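-- pv_equiv track=rewrite | github.com/Johan-Liebert1/notes | DSA/Trees/sameBst.py | check_bst_sameness
-- ===== SOURCE A (Python) =====
-- def check_bst_sameness(array1, array2, root_idx1, root_idx2, min_val, max_val):
--     # root_idx is the index in the arrays where the current subtree's root is
--     # min_val = minimum value that any node in the current subtree can have
--     # max_val = maximum value that any node in the current subtree can have
--
--     if root_idx1 == -1 or root_idx2 == -1:
--         return root_idx1 == root_idx2
--
--     if array1[root_idx1] != array2[root_idx2]:
--         return False
--
--     left_root_idx_1 = get_idx_of_first_smaller(array1, root_idx1, min_val)
--     left_root_idx_2 = get_idx_of_first_smaller(array2, root_idx2, min_val)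
--
--     right_root_idx_1 = get_idx_of_first_bigger(array1, root_idx1, max_val)
--     right_root_idx_2 = get_idx_of_first_bigger(array2, root_idx2, max_val)
--
--     current_value = array1[root_idx1]
--
--     left_are_same = check_bst_sameness(
--         array1, array2, left_root_idx_1, left_root_idx_2, min_val, current_value
--     )
--
--     right_are_same = check_bst_sameness(
--         array1, array2, right_root_idx_1, right_root_idx_2, current_value, max_val
--     )
--
--     return left_are_same and right_are_same
--
-- def get_idx_of_first_smaller(array, start_idx, min_value):
--     for i in range(start_idx + 1, len(array)):
--         if array[i] < array[start_idx] and array[i] >= min_value: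
--             return i
--
--     return -1
--
-- def get_idx_of_first_bigger(array, start_idx, max_value):
--     for i in range(start_idx + 1, len(array)):
--         if array[i] >= array[start_idx] and array[i] < max_value:
--             return i
--
--     return -1
-- ===== SOURCE B (Python) =====
-- def check_bst_sameness(array1, array2, root_idx1, root_idx2, min_val, max_val):
--     # Iterative version: an explicit worklist of (root_idx1, root_idx2, min, max) frames
--     # replaces the recursion; any mismatching frame returns False immediately.
--     stack = [(root_idx1, root_idx2, min_val, max_val)]
--     while stack:
--         r1, r2, mn, mx = stack.pop()
--         if r1 == -1 or r2 == -1: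
--             if r1 != r2:
--                 return False
--             continue
--         if array1[r1] != array2[r2]:
--             return False
--         v = array1[r1]
--         stack.append((get_idx_of_first_smaller(array1, r1, mn),
--                       get_idx_of_first_smaller(array2, r2, mn), mn, v))
--         stack.append((get_idx_of_first_bigger(array1, r1, mx),
--                       get_idx_of_first_bigger(array2, r2, mx), v, mx))
--     return True
--
-- def get_idx_of_first_smaller(array, start_idx, min_value):
--     for i in range(start_idx + 1, len(array)):
--         if array[i] < array[start_idx] and array[i] >= min_value:
--             return i
--     return -1
--
-- def get_idx_of_first_bigger(array, start_idx, max_value):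
--     for i in range(start_idx + 1, len(array)):
--         if array[i] >= array[start_idx] and array[i] < max_value:
--             return i
--     return -1
-- ===== Notes on version B (the rewrite author's own statement) =====
-- stated objective: alternative
-- what changed: The recursive descent over (left,right) subtree frames is replaced by an explicit worklist/stack of (root_idx1, root_idx2, min, max) frames with early return on the first mismatching frame; the two index-scanning helpers are kept.
import Mathlib
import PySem

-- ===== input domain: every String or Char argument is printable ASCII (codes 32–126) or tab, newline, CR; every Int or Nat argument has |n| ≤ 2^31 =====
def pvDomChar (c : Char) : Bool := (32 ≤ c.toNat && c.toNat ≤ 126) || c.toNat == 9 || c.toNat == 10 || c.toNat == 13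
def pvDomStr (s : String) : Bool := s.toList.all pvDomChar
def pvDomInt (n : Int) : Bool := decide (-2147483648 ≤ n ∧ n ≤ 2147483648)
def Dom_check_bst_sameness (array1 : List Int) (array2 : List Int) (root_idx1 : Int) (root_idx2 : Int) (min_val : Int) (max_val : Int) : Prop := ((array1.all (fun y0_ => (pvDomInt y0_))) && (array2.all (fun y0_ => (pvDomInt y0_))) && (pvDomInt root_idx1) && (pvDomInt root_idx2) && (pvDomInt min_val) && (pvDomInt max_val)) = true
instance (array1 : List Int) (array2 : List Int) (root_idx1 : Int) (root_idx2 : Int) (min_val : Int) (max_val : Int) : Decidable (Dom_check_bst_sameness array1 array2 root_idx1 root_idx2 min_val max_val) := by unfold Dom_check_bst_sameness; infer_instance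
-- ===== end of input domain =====

-- B replaces A's recursion by an explicit worklist/stack of frames (same helpers, early return
-- on the first mismatching frame); objective: alternative decomposition, same cost.

-- ===== PORT A =====
-- helpers shared by both ports: Source B copies A's two helper functions verbatim
def get_idx_of_first_smaller (array : List Int) (start_idx : Int) (min_value : Int) : Int :=
  match (PySem.List.pyRange (start_idx + 1) (array.length : Int) 1).find?
      (fun i =>
        match PySem.List.pyGet? array i, PySem.List.pyGet? array start_idx with
        | some ai, some a0 => decide (ai < a0) && decide (min_value ≤ ai)
        | _, _ => false) with
  | some i => i
  | none => -1

def get_idx_of_first_bigger (array : List Int) (start_idx : Int) (max_value : Int) : Int :=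
  match (PySem.List.pyRange (start_idx + 1) (array.length : Int) 1).find?
      (fun i =>
        match PySem.List.pyGet? array i, PySem.List.pyGet? array start_idx with
        | some ai, some a0 => decide (a0 ≤ ai) && decide (ai < max_value)
        | _, _ => false) with
  | some i => i
  | none => -1

-- A's recursion, with a fuel argument (the fuel supplied below always suffices on Pre_ inputs).
def bstRecA (fuel : Nat) (array1 array2 : List Int) (r1 r2 mn mx : Int) : Bool :=
  match fuel with
  | 0 => false
  | fuel + 1 =>
    if r1 = -1 ∨ r2 = -1 then decide (r1 = r2)
    else
      match PySem.List.pyGet? array1 r1, PySem.List.pyGet? array2 r2 with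
      | some v1, some v2 =>
        if v1 ≠ v2 then false
        else
          let l1 := get_idx_of_first_smaller array1 r1 mn
          let l2 := get_idx_of_first_smaller array2 r2 mn
          let b1 := get_idx_of_first_bigger array1 r1 mx
          let b2 := get_idx_of_first_bigger array2 r2 mx
          bstRecA fuel array1 array2 l1 l2 mn v1 && bstRecA fuel array1 array2 b1 b2 v1 mx
      | _, _ => false  -- Python raises IndexError here; excluded by Pre_

def check_bst_sameness (array1 : List Int) (array2 : List Int) (root_idx1 : Int) (root_idx2 : Int) (min_val : Int) (max_val : Int) : Bool :=
  bstRecA (2 * array1.length + 2) array1 array2 root_idx1 root_idx2 min_val max_val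

-- ===== PORT B =====
-- B's while-loop over the explicit stack (head of the list = top of the stack; Python pushes
-- the left frame then the right frame, so the popped order is right frame first).
def bstLoopB (fuel : Nat) (array1 array2 : List Int) (stack : List (Int × Int × Int × Int)) : Bool :=
  match fuel, stack with
  | _, [] => true
  | 0, _ :: _ => true  -- fuel exhausted; unreachable with the fuel supplied below
  | fuel + 1, (r1, r2, mn, mx) :: rest =>
    if r1 = -1 ∨ r2 = -1 then
      if r1 ≠ r2 then false else bstLoopB fuel array1 array2 rest
    else
      match PySem.List.pyGet? array1 r1, PySem.List.pyGet? array2 r2 with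
      | some v1, some v2 =>
        if v1 ≠ v2 then false
        else
          bstLoopB fuel array1 array2
            ((get_idx_of_first_bigger array1 r1 mx, get_idx_of_first_bigger array2 r2 mx, v1, mx) ::
             (get_idx_of_first_smaller array1 r1 mn, get_idx_of_first_smaller array2 r2 mn, mn, v1) ::
             rest)
      | _, _ => false  -- Python raises IndexError here; excluded by Pre_

def check_bst_sameness_alt (array1 : List Int) (array2 : List Int) (root_idx1 : Int) (root_idx2 : Int) (min_val : Int) (max_val : Int) : Bool :=
  bstLoopB (2 ^ (2 * array1.length + 4)) array1 array2 [(root_idx1, root_idx2, min_val, max_val)]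

-- ===== PRECONDITION & SPEC =====
-- Pre_ excludes exactly the inputs on which Python A raises IndexError: neither root index is -1
-- and at least one of them is outside Python's valid index range of its array.
def Pre_check_bst_sameness (array1 : List Int) (array2 : List Int) (root_idx1 : Int) (root_idx2 : Int) (min_val : Int) (max_val : Int) : Prop :=
  root_idx1 = -1 ∨ root_idx2 = -1 ∨
    (-(array1.length : Int) ≤ root_idx1 ∧ root_idx1 < (array1.length : Int) ∧
     -(array2.length : Int) ≤ root_idx2 ∧ root_idx2 < (array2.length : Int))
instance (array1 : List Int) (array2 : List Int) (root_idx1 : Int) (root_idx2 : Int) (min_val : Int) (max_val : Int) : Decidable (Pre_check_bst_sameness array1 array2 root_idx1 root_idx2 min_val max_val) := by unfold Pre_check_bst_sameness; infer_instance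
def pvWitness_check_bst_sameness : List Int × List Int × Int × Int × Int × Int :=
  ([10, 8, 12, 9], [10, 12, 8, 9], 0, 0, -100, 100)

def Spec_check_bst_sameness (array1 : List Int) (array2 : List Int) (root_idx1 : Int) (root_idx2 : Int) (min_val : Int) (max_val : Int) (out : Bool) : Prop := out = check_bst_sameness_alt array1 array2 root_idx1 root_idx2 min_val max_val
instance (array1 : List Int) (array2 : List Int) (root_idx1 : Int) (root_idx2 : Int) (min_val : Int) (max_val : Int) (out : Bool) : Decidable (Spec_check_bst_sameness array1 array2 root_idx1 root_idx2 min_val max_val out) := by unfold Spec_check_bst_sameness; infer_instance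

-- ===== CLAIM (what is proved, stated in full; the proofs are below) =====
def Claim_equal_check_bst_sameness : Prop := ∀ (array1 : List Int) (array2 : List Int) (root_idx1 : Int) (root_idx2 : Int) (min_val : Int) (max_val : Int), Dom_check_bst_sameness array1 array2 root_idx1 root_idx2 min_val max_val → Pre_check_bst_sameness array1 array2 root_idx1 root_idx2 min_val max_val → Spec_check_bst_sameness array1 array2 root_idx1 root_idx2 min_val max_val (check_bst_sameness array1 array2 root_idx1 root_idx2 min_val max_val)

-- ===== LEMMAS AND PROOFS =====

-- per-frame recursion-depth bound: a frame with first index r needs at most pvE len r + 1 fuel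
def pvE (len : Nat) (r : Int) : Nat := if r = -1 then 0 else ((len : Int) - r).toNat + 1

-- helper results are -1 or strictly between start_idx and the array length
theorem pv_smaller_bound (array : List Int) (start_idx v : Int) :
    get_idx_of_first_smaller array start_idx v = -1 ∨
      (start_idx < get_idx_of_first_smaller array start_idx v ∧
       get_idx_of_first_smaller array start_idx v < (array.length : Int)) := by
  unfold get_idx_of_first_smaller
  cases h : (PySem.List.pyRange (start_idx + 1) (array.length : Int) 1).find?
      (fun i =>
        match PySem.List.pyGet? array i, PySem.List.pyGet? array start_idx with
        | some ai, some a0 => decide (ai < a0) && decide (v ≤ ai)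
        | _, _ => false) with
  | none => left; rfl
  | some i =>
    right
    have hm := List.mem_of_find?_eq_some h
    rw [PySem.List.mem_pyRange_one] at hm
    simp only []
    omega

theorem pv_bigger_bound (array : List Int) (start_idx v : Int) :
    get_idx_of_first_bigger array start_idx v = -1 ∨
      (start_idx < get_idx_of_first_bigger array start_idx v ∧
       get_idx_of_first_bigger array start_idx v < (array.length : Int)) := by
  unfold get_idx_of_first_bigger
  cases h : (PySem.List.pyRange (start_idx + 1) (array.length : Int) 1).find?
      (fun i =>
        match PySem.List.pyGet? array i, PySem.List.pyGet? array start_idx with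
        | some ai, some a0 => decide (a0 ≤ ai) && decide (ai < v)
        | _, _ => false) with
  | none => left; rfl
  | some i =>
    right
    have hm := List.mem_of_find?_eq_some h
    rw [PySem.List.mem_pyRange_one] at hm
    simp only []
    omega

theorem pvE_lt (len : Nat) (r c : Int) (hr : r ≠ -1)
    (hc : c = -1 ∨ (r < c ∧ c < (len : Int))) : pvE len c < pvE len r := by
  unfold pvE
  split_ifs <;> omega

-- the recursion's value does not depend on the fuel once the fuel covers the depth bound
theorem bstRecA_irrel (f : Nat) : ∀ (g : Nat) (a1 a2 : List Int) (r1 r2 mn mx : Int),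
    pvE a1.length r1 + 1 ≤ f → pvE a1.length r1 + 1 ≤ g →
    bstRecA f a1 a2 r1 r2 mn mx = bstRecA g a1 a2 r1 r2 mn mx := by
  induction f with
  | zero => intro g a1 a2 r1 r2 mn mx hf; omega
  | succ f ih =>
    intro g a1 a2 r1 r2 mn mx hf hg
    cases g with
    | zero => omega
    | succ g =>
      simp only [bstRecA]
      by_cases hb : r1 = -1 ∨ r2 = -1
      · simp [hb]
      · simp only [hb, if_false]
        cases h1 : PySem.List.pyGet? a1 r1 <;> cases h2 : PySem.List.pyGet? a2 r2 <;>
          simp only []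
        rename_i v1 v2
        by_cases hv : v1 = v2
        · have hr1 : r1 ≠ -1 := fun h => hb (Or.inl h)
          have hl := pvE_lt a1.length r1 (get_idx_of_first_smaller a1 r1 mn) hr1
            (pv_smaller_bound a1 r1 mn)
          have hbg := pvE_lt a1.length r1 (get_idx_of_first_bigger a1 r1 mx) hr1
            (pv_bigger_bound a1 r1 mx)
          simp only [hv, ne_eq, not_true_eq_false, if_false]
          rw [ih g a1 a2 _ _ mn v2 (by omega) (by omega),
              ih g a1 a2 _ _ v2 mx (by omega) (by omega)]
        · simp [hv]

-- fuel cost of a whole stack: a frame with first index r accounts for 2^(pvE len r + 1) - 1 pops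
def pvCost (len : Nat) (stack : List (Int × Int × Int × Int)) : Nat :=
  (stack.map (fun f => 2 ^ (pvE len f.1 + 1) - 1)).sum

-- the worklist drains a stack to the conjunction of the recursion's verdicts on its frames
theorem bstLoopB_eq (fuel : Nat) : ∀ (a1 a2 : List Int) (stack : List (Int × Int × Int × Int)),
    pvCost a1.length stack ≤ fuel →
    bstLoopB fuel a1 a2 stack =
      stack.all (fun f => bstRecA (pvE a1.length f.1 + 1) a1 a2 f.1 f.2.1 f.2.2.1 f.2.2.2) := by
  induction fuel with
  | zero =>
    intro a1 a2 stack hc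
    cases stack with
    | nil => simp [bstLoopB]
    | cons hd tl =>
      exfalso
      have h2 : 1 ≤ 2 ^ (pvE a1.length hd.1 + 1) - 1 := by
        have : 2 ≤ 2 ^ (pvE a1.length hd.1 + 1) := by
          calc 2 = 2 ^ 1 := rfl
          _ ≤ 2 ^ (pvE a1.length hd.1 + 1) := Nat.pow_le_pow_right (by omega) (by omega)
        omega
      simp only [pvCost, List.map_cons, List.sum_cons] at hc
      omega
  | succ fuel ih =>
    intro a1 a2 stack hc
    cases stack with
    | nil => simp [bstLoopB]
    | cons hd tl =>
      obtain ⟨r1, r2, mn, mx⟩ := hd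
      simp only [pvCost, List.map_cons, List.sum_cons] at hc
      have hpow : 2 ≤ 2 ^ (pvE a1.length r1 + 1) :=
        calc 2 = 2 ^ 1 := rfl
        _ ≤ 2 ^ (pvE a1.length r1 + 1) := Nat.pow_le_pow_right (by omega) (by omega)
      simp only [bstLoopB, List.all_cons]
      by_cases hb : r1 = -1 ∨ r2 = -1
      · have hrec : bstRecA (pvE a1.length r1 + 1) a1 a2 r1 r2 mn mx = decide (r1 = r2) := by
          simp [bstRecA, hb]
        rw [hrec, if_pos hb]
        by_cases he : r1 = r2
        · rw [if_neg (fun h => h he)]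
          rw [ih a1 a2 tl (by unfold pvCost at *; omega)]
          simp [he]
        · rw [if_pos he]
          simp [he]
      · simp only [hb, if_false]
        conv_rhs => rw [bstRecA]
        simp only [hb, if_false]
        cases h1 : PySem.List.pyGet? a1 r1 with
        | none => cases h2 : PySem.List.pyGet? a2 r2 <;> simp
        | some v1 =>
        cases h2 : PySem.List.pyGet? a2 r2 with
        | none => simp
        | some v2 =>
        by_cases hv : v1 = v2
        · simp only [hv, ne_eq, not_true_eq_false, if_false]
          have hr1 : r1 ≠ -1 := fun h => hb (Or.inl h)
          have hl := pvE_lt a1.length r1 (get_idx_of_first_smaller a1 r1 mn) hr1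
            (pv_smaller_bound a1 r1 mn)
          have hbg := pvE_lt a1.length r1 (get_idx_of_first_bigger a1 r1 mx) hr1
            (pv_bigger_bound a1 r1 mx)
          have hpl : 2 ^ (pvE a1.length (get_idx_of_first_smaller a1 r1 mn) + 1) ≤
              2 ^ (pvE a1.length r1) := Nat.pow_le_pow_right (by omega) (by omega)
          have hpb : 2 ^ (pvE a1.length (get_idx_of_first_bigger a1 r1 mx) + 1) ≤
              2 ^ (pvE a1.length r1) := Nat.pow_le_pow_right (by omega) (by omega)
          have hsum : 2 ^ (pvE a1.length r1) + 2 ^ (pvE a1.length r1) =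
              2 ^ (pvE a1.length r1 + 1) := by ring
          rw [ih a1 a2 _ (by simp only [pvCost, List.map_cons, List.sum_cons]; omega)]
          simp only [List.all_cons]
          rw [bstRecA_irrel (pvE a1.length (get_idx_of_first_smaller a1 r1 mn) + 1)
                (pvE a1.length r1) a1 a2 _ _ mn v2 (le_refl _) (by omega),
              bstRecA_irrel (pvE a1.length (get_idx_of_first_bigger a1 r1 mx) + 1)
                (pvE a1.length r1) a1 a2 _ _ v2 mx (le_refl _) (by omega)]
          cases bstRecA (pvE a1.length r1) a1 a2 (get_idx_of_first_smaller a1 r1 mn)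
              (get_idx_of_first_smaller a2 r2 mn) mn v2 <;>
            cases bstRecA (pvE a1.length r1) a1 a2 (get_idx_of_first_bigger a1 r1 mx)
              (get_idx_of_first_bigger a2 r2 mx) v2 mx <;> simp
        · simp [hv]

theorem bstRecA_base (f : Nat) (a1 a2 : List Int) (r1 r2 mn mx : Int) (hf : 1 ≤ f)
    (hb : r1 = -1 ∨ r2 = -1) : bstRecA f a1 a2 r1 r2 mn mx = decide (r1 = r2) := by
  cases f with
  | zero => omega
  | succ f => simp [bstRecA, hb]

theorem bstLoopB_single_base (f : Nat) (a1 a2 : List Int) (r1 r2 mn mx : Int) (hf : 1 ≤ f)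
    (hb : r1 = -1 ∨ r2 = -1) :
    bstLoopB f a1 a2 [(r1, r2, mn, mx)] = decide (r1 = r2) := by
  cases f with
  | zero => omega
  | succ f =>
    simp only [bstLoopB, hb, if_true]
    by_cases he : r1 = r2
    · simp only [he, ne_eq, not_true_eq_false, if_false]
      cases f <;> rfl
    · simp [he]

-- ===== VERDICT (by name: the statement is the Claim_ definition above) =====
theorem check_bst_sameness_spec : Claim_equal_check_bst_sameness := by
  intro a1 a2 r1 r2 mn mx _hDom hPre
  unfold Spec_check_bst_sameness check_bst_sameness check_bst_sameness_alt
  have hpow1 : 1 ≤ 2 ^ (2 * a1.length + 4) := Nat.one_le_two_pow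
  by_cases hb : r1 = -1 ∨ r2 = -1
  · rw [bstRecA_base _ _ _ _ _ _ _ (by omega) hb,
        bstLoopB_single_base _ _ _ _ _ _ _ hpow1 hb]
  · have hbound : -((a1.length : Int)) ≤ r1 ∧ r1 < (a1.length : Int) := by
      unfold Pre_check_bst_sameness at hPre
      rcases hPre with h | h | h
      · exact absurd (Or.inl h) hb
      · exact absurd (Or.inr h) hb
      · exact ⟨h.1, h.2.1⟩
    have hE : pvE a1.length r1 + 1 ≤ 2 * a1.length + 2 := by
      unfold pvE; split_ifs <;> omega
    rw [bstRecA_irrel (2 * a1.length + 2) (pvE a1.length r1 + 1) a1 a2 r1 r2 mn mx hE (le_refl _)]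
    rw [bstLoopB_eq (2 ^ (2 * a1.length + 4)) a1 a2 [(r1, r2, mn, mx)]
        (by
          simp only [pvCost, List.map_cons, List.map_nil, List.sum_cons, List.sum_nil, Nat.add_zero]
          have : 2 ^ (pvE a1.length r1 + 1) ≤ 2 ^ (2 * a1.length + 4) :=
            Nat.pow_le_pow_right (by omega) (by omega)
          omega)]
    simp
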